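-- pv_equiv track=rewrite | github.com/skyrmo/Advent-of-Code-2025 | day_10/day_10_part_1.py | dfs
-- ===== SOURCE A (Python) =====
-- from collections import deque
-- from typing import Dict, List
--
-- def dfs(state: int, buttons: List[int]):
--     if state == 0:
--         return 0
--
--     # state, prev_button, steps
--     q = deque([(state, -1, 0)])
--     visited = {state: 0}
--
--     while q:
--         state, prev_button, steps = q.popleft()
--
--         for button in buttons:
--             if button == prev_button:
--                 continue
--
--             new_state = state ^ button
--             new_steps = steps + 1
--
--             if new_state == 0:
--                 return new_steps
--
--             if new_state not in visited or new_steps < visited[new_state]: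
--                 visited[new_state] = new_steps
--                 q.append((new_state, button, new_steps))
--
--     return -1  # should never happen
-- ===== SOURCE B (Python) =====
-- def dfs(state, buttons):
--     # Dynamic program over subset-XORs: best[x] = minimal number of button
--     # presses whose XOR is x.  No search queue, no previous-button bookkeeping.
--     best = {0: 0}
--     for b in buttons:
--         for x, c in list(best.items()):
--             y = x ^ b
--             if y not in best or c + 1 < best[y]:
--                 best[y] = c + 1
--     return best.get(state, -1)
-- ===== Notes on version B (the rewrite author's own statement) =====
-- stated objective: alternative
-- what changed: Replaces A's BFS over XOR states (queue, visited dict, previous-button skip) by a subset-XOR dynamic program: one dict mapping each reachable XOR value to its minimal number of presses, folded once over the buttons; it trades A's early exit on a quickly found solution for exhaustively tabulating the subset-XOR span, so it can be slower when many distinct buttons span a large space.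
-- intended difference: On inputs with state = -1 and a button equal to -1, A's prev_button sentinel -1 forbids pressing button -1 first, so A misses the one-press solution and returns a value >= 2 or -1 (e.g. dfs(-1, [-1]) = -1), while B returns the intended 1. — e.g. on dfs(-1, [-1]): A returns -1, B returns 1
import Mathlib
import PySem

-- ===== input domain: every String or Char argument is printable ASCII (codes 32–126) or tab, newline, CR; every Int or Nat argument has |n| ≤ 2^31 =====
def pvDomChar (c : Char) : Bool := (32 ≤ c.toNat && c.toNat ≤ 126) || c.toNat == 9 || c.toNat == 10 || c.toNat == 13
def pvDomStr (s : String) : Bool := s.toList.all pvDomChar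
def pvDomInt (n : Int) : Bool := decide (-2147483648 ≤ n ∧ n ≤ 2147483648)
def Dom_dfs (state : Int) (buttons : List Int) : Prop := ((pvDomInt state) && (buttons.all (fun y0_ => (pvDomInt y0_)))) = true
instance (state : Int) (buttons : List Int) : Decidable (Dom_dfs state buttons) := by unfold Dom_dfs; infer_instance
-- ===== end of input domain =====

-- B replaces A's BFS over states (with a previous-button skip) by a dynamic program over
-- subset XORs: a dict mapping each reachable XOR value to its minimal number of presses.
-- Objective: a genuinely different, simpler algorithm; see D_dfs for the one corner where
-- A's -1 sentinel makes it miss the 1-press solution.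

-- ===== PORT A =====
-- Literal port of A's BFS.  The while-loop is a recursion on a fuel counter; the fuel
-- 2 ^ buttons.length + 1 is provably sufficient (each enqueue adds a fresh visited key and
-- visited keys live in the subset-XOR span, of size ≤ 2 ^ buttons.length), so the fuel guard
-- never fires; this is proved, not assumed, in the lemmas below.
def dfsInner (s p n : Int) :
    List Int → List (Int × Int × Int) → PySem.Dict Int Int →
    Sum Int (List (Int × Int × Int) × PySem.Dict Int Int)
  | [], q, v => Sum.inr (q, v)
  | b :: bs, q, v =>
    if b = p then dfsInner s p n bs q v          -- if button == prev_button: continue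
    else
      let ns := PySem.Int.bxor s b               -- new_state = state ^ button
      let nn := n + 1                            -- new_steps = steps + 1
      if ns = 0 then Sum.inl nn                  -- if new_state == 0: return new_steps
      else
        match v.get? ns with                     -- if new_state not in visited or new_steps < visited[new_state]
        | none => dfsInner s p n bs (q ++ [(ns, b, nn)]) (v.insert ns nn)
        | some c =>
          if nn < c then dfsInner s p n bs (q ++ [(ns, b, nn)]) (v.insert ns nn)
          else dfsInner s p n bs q v

def dfsLoop (buttons : List Int) : Nat → List (Int × Int × Int) → PySem.Dict Int Int → Int
  | 0, _, _ => -1                                -- fuel guard (proved unreachable)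
  | _ + 1, [], _ => -1                           -- while q: … else return -1
  | fuel + 1, (s, p, n) :: q, v =>               -- state, prev_button, steps = q.popleft()
    match dfsInner s p n buttons q v with
    | Sum.inl r => r
    | Sum.inr (q', v') => dfsLoop buttons fuel q' v'

def dfs (state : Int) (buttons : List Int) : Int :=
  if state = 0 then 0
  else dfsLoop buttons (2 ^ buttons.length + 1)
    [(state, -1, 0)] (PySem.Dict.empty.insert state 0)

-- ===== PORT B =====
-- Literal port of Source B: best = {0: 0}; for b in buttons: for (x, c) in list(best.items()): …
def dfsAltUpd (b : Int) (d : PySem.Dict Int Int) (xc : Int × Int) : PySem.Dict Int Int :=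
  let y := PySem.Int.bxor xc.1 b                 -- y = x ^ b
  match d.get? y with                            -- if y not in best or c + 1 < best[y]
  | none => d.insert y (xc.2 + 1)
  | some cy => if xc.2 + 1 < cy then d.insert y (xc.2 + 1) else d

def dfsAltStep (best : PySem.Dict Int Int) (b : Int) : PySem.Dict Int Int :=
  best.items.foldl (dfsAltUpd b) best            -- iterate over a snapshot of best.items()

def dfs_alt (state : Int) (buttons : List Int) : Int :=
  (buttons.foldl dfsAltStep (PySem.Dict.empty.insert 0 0)).getD state (-1)

-- ===== PRECONDITION & SPEC =====
-- When the button value -1 collides with A's sentinel prev_button = -1, A forbids pressing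
-- button -1 first; on state = -1 with -1 among the buttons A therefore misses the one-press
-- solution and returns ≥ 2 or -1, while B returns the intended 1.
def D_dfs (state : Int) (buttons : List Int) : Prop := state = -1 ∧ (-1 : Int) ∈ buttons
instance (state : Int) (buttons : List Int) : Decidable (D_dfs state buttons) := by
  unfold D_dfs; infer_instance

def Spec_dfs (state : Int) (buttons : List Int) (out : Int) : Prop :=
  ¬ D_dfs state buttons → out = dfs_alt state buttons
instance (state : Int) (buttons : List Int) (out : Int) : Decidable (Spec_dfs state buttons out) := by
  unfold Spec_dfs; infer_instance

def pvDiffWitness_dfs : Int × List Int := (-1, [-1])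
def pvDiffWitnessOut_dfs : Int × Int := (-1, 1)

-- ===== CLAIM (what is proved, stated in full; the proofs are below) =====
def Claim_unchanged_dfs : Prop := ∀ (state : Int) (buttons : List Int), Dom_dfs state buttons → Spec_dfs state buttons (dfs state buttons)
def Claim_changed_dfs : Prop := Dom_dfs (pvDiffWitness_dfs.1) (pvDiffWitness_dfs.2) ∧ D_dfs (pvDiffWitness_dfs.1) (pvDiffWitness_dfs.2) ∧ dfs (pvDiffWitness_dfs.1) (pvDiffWitness_dfs.2) = pvDiffWitnessOut_dfs.1 ∧ dfs_alt (pvDiffWitness_dfs.1) (pvDiffWitness_dfs.2) = pvDiffWitnessOut_dfs.2 ∧ pvDiffWitnessOut_dfs.1 ≠ pvDiffWitnessOut_dfs.2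
def Claim_exact_dfs : Prop := ∀ (state : Int) (buttons : List Int), Dom_dfs state buttons → D_dfs state buttons → dfs state buttons ≠ dfs_alt state buttons

-- ===== LEMMAS AND PROOFS =====

-- ## XOR algebra on Int (Python-exact bxor)

def pvSgn (a : Int) : Bool := decide (0 ≤ a)
def pvMag (a : Int) : Nat := if 0 ≤ a then a.toNat else (-a - 1).toNat
def pvEnc (s : Bool) (m : Nat) : Int := if s then (m : Int) else -(m : Int) - 1

lemma bxor_enc (a b : Int) :
    PySem.Int.bxor a b = pvEnc (pvSgn a == pvSgn b) (pvMag a ^^^ pvMag b) := by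
  unfold PySem.Int.bxor pvEnc pvSgn pvMag
  by_cases ha : 0 ≤ a <;> by_cases hb : 0 ≤ b <;> simp [ha, hb]

lemma pvSgn_enc (s : Bool) (m : Nat) : pvSgn (pvEnc s m) = s := by
  unfold pvSgn pvEnc; cases s <;> simp <;> omega

lemma pvMag_enc (s : Bool) (m : Nat) : pvMag (pvEnc s m) = m := by
  unfold pvMag pvEnc; cases s <;> simp <;> omega

lemma bxor_assoc (a b c : Int) :
    PySem.Int.bxor (PySem.Int.bxor a b) c = PySem.Int.bxor a (PySem.Int.bxor b c) := by
  rw [bxor_enc a b, bxor_enc b c, bxor_enc (pvEnc (pvSgn a == pvSgn b) (pvMag a ^^^ pvMag b)) c,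
    bxor_enc a (pvEnc (pvSgn b == pvSgn c) (pvMag b ^^^ pvMag c)),
    pvSgn_enc, pvMag_enc, pvSgn_enc, pvMag_enc, Nat.xor_assoc]
  cases pvSgn a <;> cases pvSgn b <;> cases pvSgn c <;> rfl

lemma zero_bxor (a : Int) : PySem.Int.bxor 0 a = a := by
  rw [PySem.Int.bxor_comm]; exact PySem.Int.bxor_zero a

lemma bxor_cancel_right (a b : Int) : PySem.Int.bxor (PySem.Int.bxor a b) b = a := by
  rw [bxor_assoc, PySem.Int.bxor_self, PySem.Int.bxor_zero]

lemma bxor_left_comm (a b c : Int) :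
    PySem.Int.bxor a (PySem.Int.bxor b c) = PySem.Int.bxor b (PySem.Int.bxor a c) := by
  rw [← bxor_assoc, ← bxor_assoc, PySem.Int.bxor_comm a b]

lemma bxor_eq_zero_iff (a b : Int) : PySem.Int.bxor a b = 0 ↔ a = b := by
  constructor
  · intro h
    have := congrArg (fun z => PySem.Int.bxor z b) h
    simpa [bxor_cancel_right, zero_bxor] using this
  · rintro rfl; exact PySem.Int.bxor_self a

-- ## pxor: xor of a list

def pxor (l : List Int) : Int := l.foldr PySem.Int.bxor 0

lemma pxor_nil : pxor [] = 0 := rfl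
lemma pxor_cons (a : Int) (l : List Int) : pxor (a :: l) = PySem.Int.bxor a (pxor l) := rfl
lemma pxor_singleton (a : Int) : pxor [a] = a := PySem.Int.bxor_zero a

lemma pxor_append (l₁ l₂ : List Int) :
    pxor (l₁ ++ l₂) = PySem.Int.bxor (pxor l₁) (pxor l₂) := by
  induction l₁ with
  | nil => simp [pxor_nil, zero_bxor]
  | cons a l ih => simp [pxor_cons, ih, bxor_assoc]

lemma pxor_perm {l₁ l₂ : List Int} (h : l₁.Perm l₂) : pxor l₁ = pxor l₂ := by
  induction h with
  | nil => rfl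
  | cons a _ ih => simp [pxor_cons, ih]
  | swap a b l => simp [pxor_cons, bxor_left_comm]
  | trans _ _ ih₁ ih₂ => exact ih₁.trans ih₂

-- ## minimal subset-XOR count

def minCnt (buttons : List Int) (x : Int) : Option Nat :=
  ((buttons.sublists.filter (fun S => decide (pxor S = x))).map List.length).min?

lemma minCnt_eq_some_iff (buttons : List Int) (x : Int) (k : Nat) :
    minCnt buttons x = some k ↔
      ((∃ S, S.Sublist buttons ∧ pxor S = x ∧ S.length = k) ∧
       ∀ S, S.Sublist buttons → pxor S = x → k ≤ S.length) := by
  unfold minCnt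
  rw [List.min?_eq_some_iff]
  constructor
  · rintro ⟨hmem, hle⟩
    refine ⟨?_, ?_⟩
    · rcases List.mem_map.mp hmem with ⟨S, hS, rfl⟩
      rcases List.mem_filter.mp hS with ⟨hsub, hx⟩
      exact ⟨S, List.mem_sublists.mp hsub, of_decide_eq_true hx, rfl⟩
    · intro S hsub hx
      exact hle _ (List.mem_map.mpr ⟨S, List.mem_filter.mpr
        ⟨List.mem_sublists.mpr hsub, decide_eq_true hx⟩, rfl⟩)
  · rintro ⟨⟨S, hsub, hx, rfl⟩, hle⟩
    refine ⟨List.mem_map.mpr ⟨S, List.mem_filter.mpr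
      ⟨List.mem_sublists.mpr hsub, decide_eq_true hx⟩, rfl⟩, ?_⟩
    intro m hm
    rcases List.mem_map.mp hm with ⟨S', hS', rfl⟩
    rcases List.mem_filter.mp hS' with ⟨hsub', hx'⟩
    exact hle _ (List.mem_sublists.mp hsub') (of_decide_eq_true hx')

lemma minCnt_eq_none_iff (buttons : List Int) (x : Int) :
    minCnt buttons x = none ↔ ∀ S, S.Sublist buttons → pxor S ≠ x := by
  unfold minCnt
  rw [List.min?_eq_none_iff, List.map_eq_nil_iff, List.filter_eq_nil_iff]
  constructor
  · intro h S hsub hx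
    exact absurd (decide_eq_true hx) (by simpa using h S (List.mem_sublists.mpr hsub))
  · intro h S hS
    simpa using h S (List.mem_sublists.mp hS)

lemma minCnt_le (buttons : List Int) (x : Int) {S : List Int}
    (hsub : S.Sublist buttons) (hx : pxor S = x) :
    ∃ k, minCnt buttons x = some k ∧ k ≤ S.length := by
  cases h : minCnt buttons x with
  | none => exact absurd hx ((minCnt_eq_none_iff _ _).mp h S hsub)
  | some k => exact ⟨k, rfl, ((minCnt_eq_some_iff _ _ _).mp h).2 S hsub hx⟩

-- ## walks, solutions

def Walk (buttons : List Int) (l : List Int) : Prop :=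
  List.IsChain (· ≠ ·) ((-1 : Int) :: l) ∧ ∀ a ∈ l, a ∈ buttons

def PathTo (x0 : Int) (buttons : List Int) (s p n : Int) : Prop :=
  ∃ l, Walk buttons l ∧ s = PySem.Int.bxor x0 (pxor l) ∧
    ((-1 : Int) :: l).getLast (by simp) = p ∧ n = (l.length : Int)

def SolLen (x0 : Int) (buttons : List Int) (j : Int) : Prop :=
  ∃ l, Walk buttons l ∧ l ≠ [] ∧ pxor l = x0 ∧ (l.length : Int) = j

-- a list reduces to a duplicate-free sublist with the same xor
lemma seqToSubAux (buttons : List Int) :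
    ∀ (m : Nat) (l : List Int), l.length ≤ m → (∀ a ∈ l, a ∈ buttons) →
      ∃ S, S.Sublist buttons ∧ pxor S = pxor l ∧ S.length ≤ l.length := by
  intro m
  induction m with
  | zero =>
    intro l hl _
    have : l = [] := List.length_eq_zero_iff.mp (Nat.le_zero.mp hl)
    subst this
    exact ⟨[], List.nil_sublist _, rfl, le_refl _⟩
  | succ m ih =>
    intro l hl hsub
    by_cases hnd : l.Nodup
    · rcases hnd.subperm hsub with ⟨S, hperm, hS⟩
      exact ⟨S, hS, pxor_perm hperm, le_of_eq hperm.length_eq⟩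
    · rcases List.exists_duplicate_iff_not_nodup.mpr hnd with ⟨x, hdup⟩
      have hx : x ∈ l := hdup.mem
      have hcnt : 2 ≤ List.count x l := List.duplicate_iff_two_le_count.mp hdup
      have hx2 : x ∈ l.erase x := by
        rw [← List.count_pos_iff, List.count_erase_self]; omega
      have hp1 : l.Perm (x :: l.erase x) := List.perm_cons_erase hx
      have hp2 : l.erase x |>.Perm (x :: (l.erase x).erase x) := List.perm_cons_erase hx2
      set t := (l.erase x).erase x with ht
      have hperm : l.Perm (x :: x :: t) := hp1.trans (hp2.cons x)
      have hlen : l.length = t.length + 2 := by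
        have := hperm.length_eq; simpa using this
      have htsub : ∀ a ∈ t, a ∈ buttons := by
        intro a ha
        exact hsub a (List.erase_subset (List.erase_subset ha))
      rcases ih t (by omega) htsub with ⟨S, hS, hxor, hle⟩
      refine ⟨S, hS, ?_, by omega⟩
      rw [hxor, pxor_perm hperm, pxor_cons, pxor_cons, ← bxor_assoc,
        PySem.Int.bxor_self, zero_bxor]

lemma seqToSub (buttons : List Int) :
    ∀ (l : List Int), (∀ a ∈ l, a ∈ buttons) →
      ∃ S, S.Sublist buttons ∧ pxor S = pxor l ∧ S.length ≤ l.length :=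
  fun l => seqToSubAux buttons l.length l (le_refl _)

lemma sol_min_bound (x0 : Int) (buttons : List Int) (j : Int)
    (h : SolLen x0 buttons j) :
    ∃ k, minCnt buttons x0 = some k ∧ (k : Int) ≤ j := by
  rcases h with ⟨l, ⟨-, hbtn⟩, -, hxor, hlen⟩
  rcases seqToSub buttons l hbtn with ⟨S, hS, hx, hle⟩
  rcases minCnt_le buttons x0 hS (hx.trans hxor) with ⟨k, hk, hkle⟩
  exact ⟨k, hk, by omega⟩

-- glueing chains of distinct consecutive values
lemma isChain_ne_append (a : Int) (l₁ l₂ : List Int)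
    (h₁ : List.IsChain (· ≠ ·) (a :: l₁)) (h₂ : List.IsChain (· ≠ ·) l₂)
    (hj : ∀ h : l₂ ≠ [], (a :: l₁).getLast (by simp) ≠ l₂.head h) :
    List.IsChain (· ≠ ·) (a :: l₁ ++ l₂) := by
  induction l₁ generalizing a with
  | nil =>
    cases l₂ with
    | nil => exact h₁
    | cons c cs =>
      exact List.isChain_cons_cons.mpr ⟨hj (by simp), h₂⟩
  | cons x xs ih =>
    rcases List.isChain_cons_cons.mp h₁ with ⟨hax, hxl⟩
    refine List.isChain_cons_cons.mpr ⟨hax, ?_⟩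
    refine ih x hxl ?_
    intro h
    have : (x :: xs).getLast (by simp) = (a :: x :: xs).getLast (by simp) :=
      (List.getLast_cons (by simp)).symm
    rw [this]
    exact hj h

-- a path followed by a duplicate-free continuation is a solution
lemma walk_glue (x0 : Int) (buttons : List Int) (u pl m : Int)
    (hpath : PathTo x0 buttons u pl m) (rs : List Int)
    (hrs : rs ≠ []) (hnd : rs.Nodup) (hb : ∀ a ∈ rs, a ∈ buttons)
    (hhd : rs.head hrs ≠ pl) (hx : PySem.Int.bxor u (pxor rs) = 0) :
    SolLen x0 buttons (m + rs.length) := by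
  rcases hpath with ⟨l, ⟨hch, hbl⟩, hu, hlast, hm⟩
  refine ⟨l ++ rs, ⟨?_, ?_⟩, by simp [hrs], ?_, by push_cast [List.length_append]; omega⟩
  · have := isChain_ne_append (-1) l rs hch (List.Pairwise.isChain hnd)
      (fun h => by rw [hlast]; exact fun hc => hhd (by rw [← hc]))
    simpa using this
  · intro a ha
    rcases List.mem_append.mp ha with h | h
    · exact hbl a h
    · exact hb a h
  · have h0 : PySem.Int.bxor x0 (pxor (l ++ rs)) = 0 := by
      rw [pxor_append, ← bxor_assoc, ← hu]; exact hx
    exact ((bxor_eq_zero_iff _ _).mp h0).symm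

-- continuation [pl] clashing with the path's last button: drop the last button
lemma clash_drop (x0 : Int) (buttons : List Int) (hx0 : x0 ≠ 0) (u pl m : Int)
    (hpath : PathTo x0 buttons u pl m) (hcl : PySem.Int.bxor u pl = 0) :
    (u = x0 ∧ pl = -1 ∧ m = 0) ∨ (SolLen x0 buttons (m - 1) ∧ 1 ≤ m) := by
  rcases hpath with ⟨l, ⟨hch, hbl⟩, hu, hlast, hm⟩
  cases l with
  | nil =>
    left
    refine ⟨by simpa [pxor_nil, PySem.Int.bxor_zero] using hu, by simpa using hlast.symm, by simpa using hm⟩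
  | cons c cs =>
    right
    set l := c :: cs with hldef
    have hlne : l ≠ [] := by simp [hldef]
    have hlastl : l.getLast hlne = pl := by
      rw [← hlast]; exact (List.getLast_cons hlne).symm
    have hupl : u = pl := (bxor_eq_zero_iff _ _).mp hcl
    have hsplit : l.dropLast ++ [pl] = l := by
      rw [← hlastl]; exact List.dropLast_concat_getLast hlne
    have hxor' : PySem.Int.bxor x0 (pxor l.dropLast) = 0 := by
      have h1 : pxor l = PySem.Int.bxor (pxor l.dropLast) pl := by
        conv_lhs => rw [← hsplit]
        rw [pxor_append, pxor_singleton]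
      have h2 : PySem.Int.bxor (PySem.Int.bxor x0 (pxor l.dropLast)) pl = pl := by
        rw [bxor_assoc, ← h1, ← hu, hupl]
      have := congrArg (fun z => PySem.Int.bxor z pl) h2
      simpa [bxor_cancel_right, PySem.Int.bxor_self] using this
    have hxl : pxor l.dropLast = x0 := ((bxor_eq_zero_iff _ _).mp hxor').symm
    have hdne : l.dropLast ≠ [] := by
      intro hc
      rw [hc, pxor_nil] at hxl
      exact hx0 hxl.symm
    constructor
    · refine ⟨l.dropLast, ⟨?_, ?_⟩, hdne, hxl, ?_⟩
      · have : ((-1 : Int) :: l.dropLast).Sublist ((-1 : Int) :: l) :=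
          (List.dropLast_sublist l).cons₂ _
        -- prefix of a ≠-chain is a ≠-chain
        have hpre : ((-1 : Int) :: l.dropLast) ++ [pl] = (-1 : Int) :: l := by
          rw [List.cons_append, hsplit]
        have := hch
        rw [← hpre] at this
        exact List.IsChain.left_of_append this
      · intro a ha
        exact hbl a (List.dropLast_sublist l |>.mem ha)
      · rw [List.length_dropLast]
        have : (1:Nat) ≤ l.length := by simp [hldef]
        push_cast [Nat.cast_sub this] at hm ⊢
        omega
    · have : (1:Nat) ≤ l.length := by simp [hldef]
      omega

lemma pathTo_extend (x0 : Int) (buttons : List Int) (s p n b : Int)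
    (hpath : PathTo x0 buttons s p n) (hb : b ∈ buttons) (hbp : b ≠ p) :
    PathTo x0 buttons (PySem.Int.bxor s b) b (n + 1) := by
  rcases hpath with ⟨l, ⟨hch, hbl⟩, hs, hlast, hn⟩
  refine ⟨l ++ [b], ⟨?_, ?_⟩, ?_, ?_, by rw [hn]; push_cast [List.length_append, List.length_singleton]; ring⟩
  · have := isChain_ne_append (-1) l [b] hch (List.isChain_singleton b)
      (fun _ => by rw [hlast]; simpa using fun hc => hbp (by rw [hc]))
    simpa using this
  · intro a ha
    rcases List.mem_append.mp ha with h | h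
    · exact hbl a h
    · simp at h; subst h; exact hb
  · rw [pxor_append, pxor_singleton, ← bxor_assoc, ← hs]
  · have h1 : ((-1:Int) :: (l ++ [b])).getLast? = some b := by
      rw [show ((-1:Int) :: (l ++ [b])) = ((-1:Int) :: l) ++ [b] by simp]
      exact List.getLast?_concat
    have h2 := List.getLast?_eq_some_getLast (l := ((-1:Int) :: (l ++ [b]))) (by simp)
    rw [h1] at h2
    exact (Option.some_injective _ h2).symm

lemma pathTo_nonneg (x0 : Int) (buttons : List Int) (s p n : Int)
    (hpath : PathTo x0 buttons s p n) : 0 ≤ n := by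
  rcases hpath with ⟨l, _, _, _, rfl⟩; exact_mod_cast Int.natCast_nonneg l.length

-- ## the BFS invariant

def BfsInv (x0 : Int) (buttons : List Int) (t : Int)
    (q : List (Int × Int × Int)) (v : PySem.Dict Int Int) : Prop :=
  (∀ e ∈ q, e.1 ≠ 0 ∧ PathTo x0 buttons e.1 e.2.1 e.2.2 ∧ t ≤ e.2.2 ∧ e.2.2 ≤ t + 1) ∧
  List.Pairwise (fun a b : Int × Int × Int => a.2.2 ≤ b.2.2) q ∧
  (∀ k c, v.get? k = some c →
    (∃ pp, PathTo x0 buttons k pp c) ∧ c ≤ t + 1 ∧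
      (c ≤ t ∨ ∃ e ∈ q, e.1 = k ∧ e.2.2 = c)) ∧
  v.keys.Nodup ∧
  (∀ k ∈ v.keys, ∃ S, S.Sublist buttons ∧ k = PySem.Int.bxor x0 (pxor S))

def Desig (buttons : List Int) (k : Nat) (e : Int × Int × Int) : Prop :=
  ∃ r, ∃ hr : r ≠ [], r.Nodup ∧ (∀ a ∈ r, a ∈ buttons) ∧ r.head hr ≠ e.2.1 ∧
    PySem.Int.bxor e.1 (pxor r) = 0 ∧ e.2.2 + (r.length : Int) = (k : Int)

lemma bfsinv_relevel (x0 : Int) (buttons : List Int) (t : Int) (s p n : Int)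
    (q : List (Int × Int × Int)) (v : PySem.Dict Int Int)
    (h : BfsInv x0 buttons t ((s, p, n) :: q) v) : BfsInv x0 buttons n q v := by
  obtain ⟨hq, hpw, hv, hnd, hkeys⟩ := h
  obtain ⟨hhd, hpw'⟩ := List.pairwise_cons.mp hpw
  have hwin : t ≤ n ∧ n ≤ t + 1 := by
    have := (hq (s, p, n) (by simp)).2.2; simpa using this
  refine ⟨?_, hpw', ?_, hnd, hkeys⟩
  · intro e he
    obtain ⟨h1, h2, h3, h4⟩ := hq e (by simp [he])
    have h5 : n ≤ e.2.2 := hhd e he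
    exact ⟨h1, h2, h5, by omega⟩
  · intro k c hk
    obtain ⟨h1, h2, h3⟩ := hv k c hk
    refine ⟨h1, by omega, ?_⟩
    rcases h3 with h3 | ⟨e, he, he1, he2⟩
    · left; omega
    · rcases List.mem_cons.mp he with rfl | he'
      · left
        have : c = n := by simpa using he2.symm
        omega
      · right; exact ⟨e, he', he1, he2⟩

-- ## the inner for-loop

def InnerOut (x0 : Int) (buttons : List Int) (n : Int)
    (q : List (Int × Int × Int)) (v : PySem.Dict Int Int)
    (res : Sum Int (List (Int × Int × Int) × PySem.Dict Int Int)) : Prop :=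
  (∀ r', res = Sum.inl r' → r' = n + 1 ∧ SolLen x0 buttons (n + 1)) ∧
  (∀ q' v', res = Sum.inr (q', v') →
    BfsInv x0 buttons n q' v' ∧ q'.length + v.size = q.length + v'.size ∧ ∃ app, q' = q ++ app)

lemma inv_enqueue (x0 : Int) (buttons : List Int)
    (s p n b : Int) (hp : PathTo x0 buttons s p n) (hb : b ∈ buttons) (hbp : b ≠ p)
    (hns : PySem.Int.bxor s b ≠ 0)
    (q : List (Int × Int × Int)) (v : PySem.Dict Int Int)
    (hinv : BfsInv x0 buttons n q v) (hv : v.get? (PySem.Int.bxor s b) = none) :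
    BfsInv x0 buttons n (q ++ [(PySem.Int.bxor s b, b, n + 1)])
      (v.insert (PySem.Int.bxor s b) (n + 1)) := by
  obtain ⟨hq, hpw, hvs, hnd, hkeys⟩ := hinv
  have hpath' : PathTo x0 buttons (PySem.Int.bxor s b) b (n + 1) :=
    pathTo_extend x0 buttons s p n b hp hb hbp
  refine ⟨?_, ?_, ?_, ?_, ?_⟩
  · intro e he
    rcases List.mem_append.mp he with h | h
    · exact hq e h
    · simp only [List.mem_singleton] at h
      subst h
      exact ⟨hns, hpath', by simp, by simp⟩
  · rw [List.pairwise_append]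
    refine ⟨hpw, List.pairwise_singleton _ _, ?_⟩
    intro e he f hf
    simp only [List.mem_singleton] at hf
    subst hf
    have := (hq e he).2.2.2
    simpa using by omega
  · intro k c hk
    rw [PySem.Dict.get?_insert] at hk
    by_cases hkn : k = PySem.Int.bxor s b
    · rw [if_pos hkn] at hk
      have hc : c = n + 1 := by simpa using hk.symm
      subst hc
      refine ⟨⟨b, hkn ▸ hpath'⟩, by omega, Or.inr ?_⟩
      exact ⟨(PySem.Int.bxor s b, b, n + 1), by simp, hkn.symm, rfl⟩
    · rw [if_neg hkn] at hk
      obtain ⟨h1, h2, h3⟩ := hvs k c hk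
      refine ⟨h1, h2, ?_⟩
      rcases h3 with h3 | ⟨e, he, he1, he2⟩
      · exact Or.inl h3
      · exact Or.inr ⟨e, List.mem_append.mpr (Or.inl he), he1, he2⟩
  · exact PySem.Dict.nodup_keys_insert _ _ _ hnd
  · intro k hk
    rcases (PySem.Dict.mem_keys_insert _ _ _ _).mp hk with hkn | hk'
    · subst hkn
      rcases hpath' with ⟨l, ⟨-, hbl⟩, hsv, -, -⟩
      rcases seqToSub buttons l hbl with ⟨S, hS, hxS, -⟩
      exact ⟨S, hS, by rw [hsv, hxS]⟩
    · exact hkeys k hk'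

lemma inner_master (x0 : Int) (buttons : List Int) (hx0 : x0 ≠ 0)
    (s p n : Int) (hs : s ≠ 0) (hp : PathTo x0 buttons s p n) :
    ∀ (bs : List Int) (q : List (Int × Int × Int)) (v : PySem.Dict Int Int),
      (∀ b ∈ bs, b ∈ buttons) → BfsInv x0 buttons n q v →
      InnerOut x0 buttons n q v (dfsInner s p n bs q v) := by
  intro bs
  induction bs with
  | nil =>
    intro q v _ hinv
    refine ⟨fun r' h => by simp [dfsInner] at h, fun q' v' h => ?_⟩
    simp only [dfsInner, Sum.inr.injEq, Prod.mk.injEq] at h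
    obtain ⟨rfl, rfl⟩ := h
    exact ⟨hinv, rfl, [], by simp⟩
  | cons b bs ih =>
    intro q v hbs hinv
    have hb : b ∈ buttons := hbs b (by simp)
    have hbs' : ∀ b' ∈ bs, b' ∈ buttons := fun b' h => hbs b' (by simp [h])
    by_cases hbp : b = p
    · simpa [dfsInner, hbp] using ih q v hbs' hinv
    · simp only [dfsInner, if_neg hbp]
      by_cases hns : PySem.Int.bxor s b = 0
      · simp only [if_pos hns]
        refine ⟨fun r' h => ?_, fun q' v' h => by simp at h⟩
        have hr' : r' = n + 1 := by simpa using h.symm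
        refine ⟨hr', ?_⟩
        have := walk_glue x0 buttons s p n hp [b] (by simp) (by simp)
          (by simpa using hb) (by simpa using hbp) (by rwa [pxor_singleton])
        simpa using this
      · simp only [if_neg hns]
        cases hv : v.get? (PySem.Int.bxor s b) with
        | none =>
          have hinv' := inv_enqueue x0 buttons s p n b hp hb hbp hns q v hinv hv
          have hout := ih _ _ hbs' hinv'
          refine ⟨hout.1, fun q' v' h => ?_⟩
          obtain ⟨hinv'', hacc, app, happ⟩ := hout.2 q' v' h
          have hfresh : v.contains (PySem.Int.bxor s b) = false := by
            rw [PySem.Dict.contains_eq_isSome_get?, hv]; rfl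
          have hsize : (v.insert (PySem.Int.bxor s b) (n + 1)).size = v.size + 1 := by
            rw [PySem.Dict.size_insert, if_neg (by simp [hfresh])]
          refine ⟨hinv'', by simp at hacc ⊢; omega, ?_⟩
          exact ⟨(PySem.Int.bxor s b, b, n + 1) :: app, by simp [happ]⟩
        | some c =>
          have hcle : c ≤ n + 1 := ((hinv.2.2.1) _ _ hv).2.1
          dsimp only
          rw [if_neg (by omega)]
          exact ih q v hbs' hinv

lemma inner_finds (s p n : Int) :
    ∀ (bs : List Int) (q : List (Int × Int × Int)) (v : PySem.Dict Int Int),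
      (∃ b ∈ bs, b ≠ p ∧ PySem.Int.bxor s b = 0) →
      dfsInner s p n bs q v = Sum.inl (n + 1) := by
  intro bs
  induction bs with
  | nil => intro q v h; simp at h
  | cons b bs ih =>
    intro q v ⟨b', hb', hne, hzero⟩
    by_cases hbp : b = p
    · have hb'' : b' ∈ bs := by
        rcases List.mem_cons.mp hb' with rfl | h
        · exact absurd hbp (by rw [hbp] at hne ⊢; exact hne)
        · exact h
      simpa [dfsInner, hbp] using ih q v ⟨b', hb'', hne, hzero⟩
    · simp only [dfsInner, if_neg hbp]
      by_cases hns : PySem.Int.bxor s b = 0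
      · simp [if_pos hns]
      · simp only [if_neg hns]
        have hb'' : b' ∈ bs := by
          rcases List.mem_cons.mp hb' with rfl | h
          · exact absurd hzero hns
          · exact h
        cases hv : v.get? (PySem.Int.bxor s b) with
        | none => exact ih _ _ ⟨b', hb'', hne, hzero⟩
        | some c =>
          dsimp only
          split_ifs <;> exact ih _ _ ⟨b', hb'', hne, hzero⟩

lemma inner_desig (x0 : Int) (buttons : List Int) (hx0 : x0 ≠ 0) (k : Nat)
    (hmin : minCnt buttons x0 = some k)
    (s p n : Int) (hs : s ≠ 0) (hp : PathTo x0 buttons s p n)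
    (r : List Int) (hrne : r ≠ []) (hrnd : r.Nodup) (hrbtn : ∀ a ∈ r, a ∈ buttons)
    (hrhead : r.head hrne ≠ p) (hrx : PySem.Int.bxor s (pxor r) = 0)
    (hrk : n + (r.length : Int) = (k : Int)) (hr2 : 2 ≤ r.length) :
    ∀ (bs : List Int) (q : List (Int × Int × Int)) (v : PySem.Dict Int Int),
      (∀ b ∈ bs, b ∈ buttons) → BfsInv x0 buttons n q v →
      (r.head hrne ∈ bs ∨ ∃ e ∈ q, Desig buttons k e) →
      ∀ q' v', dfsInner s p n bs q v = Sum.inr (q', v') →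
        ∃ e ∈ q', Desig buttons k e := by
  -- shared facts about the continuation r = r.head :: r.tail
  have h0n : 0 ≤ n := pathTo_nonneg x0 buttons s p n hp
  have hcons : r.head hrne :: r.tail = r := List.cons_head_tail hrne
  have htne : r.tail ≠ [] := by
    intro hc
    rw [← hcons, hc] at hr2
    simp at hr2
  have hndc : (r.head hrne :: r.tail).Nodup := by rw [hcons]; exact hrnd
  have hheadnin : r.head hrne ∉ r.tail := fun hmem =>
    (List.pairwise_cons.mp hndc).1 _ hmem rfl
  have htnd : r.tail.Nodup := (List.pairwise_cons.mp hndc).2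
  have htb : ∀ a ∈ r.tail, a ∈ buttons := fun a ha =>
    hrbtn a (hcons ▸ List.mem_cons_of_mem _ ha)
  have htx : PySem.Int.bxor (PySem.Int.bxor s (r.head hrne)) (pxor r.tail) = 0 := by
    rw [bxor_assoc, ← pxor_cons, hcons]
    exact hrx
  have hlen' : (r.tail.length : Int) = (r.length : Int) - 1 := by
    have : r.tail.length + 1 = r.length := by
      rw [List.length_tail]
      omega
    omega
  have hkn2 : (k : Int) = n + (r.length : Int) := hrk.symm
  have hrlen2 : (2 : Int) ≤ (r.length : Int) := by exact_mod_cast hr2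
  intro bs
  induction bs with
  | nil =>
    intro q v _ _ hpend q' v' h
    rcases hpend with hmem | hdes
    · exact absurd hmem (List.not_mem_nil)
    · simp only [dfsInner, Sum.inr.injEq, Prod.mk.injEq] at h
      obtain ⟨rfl, -⟩ := h
      exact hdes
  | cons b bs ih =>
    intro q v hbs hinv hpend q' v' h
    have hb : b ∈ buttons := hbs b (by simp)
    have hbs' : ∀ b' ∈ bs, b' ∈ buttons := fun b' hh => hbs b' (by simp [hh])
    by_cases hbp : b = p
    · simp only [dfsInner, if_pos hbp] at h
      refine ih q v hbs' hinv ?_ q' v' h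
      rcases hpend with hmem | hdes
      · left
        rcases List.mem_cons.mp hmem with hc | hc
        · exact absurd (hc.trans hbp) hrhead
        · exact hc
      · exact Or.inr hdes
    · simp only [dfsInner, if_neg hbp] at h
      by_cases hns : PySem.Int.bxor s b = 0
      · rw [if_pos hns] at h
        exact absurd h (by simp)
      · rw [if_neg hns] at h
        cases hv : v.get? (PySem.Int.bxor s b) with
        | none =>
          rw [hv] at h
          dsimp only at h
          have hinv₁ := inv_enqueue x0 buttons s p n b hp hb hbp hns q v hinv hv
          rcases hpend with hmem | ⟨e, he, hdese⟩
          · by_cases hhb : r.head hrne = b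
            · -- the designated successor is enqueued now
              refine ih _ _ hbs' hinv₁ (Or.inr ?_) q' v' h
              refine ⟨(PySem.Int.bxor s b, b, n + 1), by simp, r.tail, htne, htnd, htb, ?_, ?_, ?_⟩
              · show r.tail.head htne ≠ b
                intro hc
                exact hheadnin (hhb ▸ hc ▸ List.head_mem htne)
              · show PySem.Int.bxor (PySem.Int.bxor s b) (pxor r.tail) = 0
                rw [← hhb]
                exact htx
              · show n + 1 + (r.tail.length : Int) = (k : Int)
                omega
            · refine ih _ _ hbs' hinv₁ (Or.inl ?_) q' v' h
              rcases List.mem_cons.mp hmem with hc | hc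
              · exact absurd hc hhb
              · exact hc
          · exact ih _ _ hbs' hinv₁
              (Or.inr ⟨e, List.mem_append.mpr (Or.inl he), hdese⟩) q' v' h
        | some c =>
          rw [hv] at h
          dsimp only at h
          obtain ⟨⟨pp, hpathu⟩, hcle, hinq⟩ := hinv.2.2.1 _ _ hv
          rw [if_neg (by omega)] at h
          rcases hpend with hmem | ⟨e, he, hdese⟩
          · by_cases hhb : r.head hrne = b
            · -- the designated successor was already visited: its value must be n + 1
              have hcn : ¬ c ≤ n := by
                intro hcn
                -- a strictly shorter solution through the earlier arrival: contradiction
                by_cases hex : ∃ a ∈ r.tail, a ≠ pp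
                · obtain ⟨a, ha, hap⟩ := hex
                  have hperm : (a :: r.tail.erase a).Perm r.tail :=
                    (List.perm_cons_erase ha).symm
                  have hsol := walk_glue x0 buttons (PySem.Int.bxor s b) pp c hpathu
                    (a :: r.tail.erase a) (by simp) (hperm.nodup_iff.mpr htnd)
                    (fun x hx => htb x (hperm.mem_iff.mp hx)) (by simpa using hap)
                    (by rw [pxor_perm hperm, ← hhb]; exact htx)
                  rcases sol_min_bound x0 buttons _ hsol with ⟨k', hk', hkle⟩
                  rw [hmin] at hk'
                  have hkk : k' = k := by injection hk'.symm
                  subst hkk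
                  have hlp : ((a :: r.tail.erase a).length : Int) = (r.length : Int) - 1 := by
                    rw [hperm.length_eq]; exact hlen'
                  omega
                · push_neg at hex
                  have htsing : r.tail = [pp] := by
                    cases htl : r.tail with
                    | nil => exact absurd htl htne
                    | cons a2 t2 =>
                      have ha2 : a2 = pp := hex a2 (by rw [htl]; simp)
                      cases t2 with
                      | nil => rw [ha2]
                      | cons a3 t3 =>
                        have ha3 : a3 = pp := hex a3 (by rw [htl]; simp)
                        have : a2 ≠ a3 := by
                          have := htnd
                          rw [htl] at this
                          exact (List.pairwise_cons.mp this).1 a3 (by simp)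
                        exact absurd (ha2.trans ha3.symm) this
                  have hclash : PySem.Int.bxor (PySem.Int.bxor s b) pp = 0 := by
                    have := htx
                    rw [hhb, htsing, pxor_singleton] at this
                    exact this
                  rcases clash_drop x0 buttons hx0 _ pp c hpathu hclash with
                    ⟨hux, hpl, hc0⟩ | ⟨hsol, hc1⟩
                  · -- u1 = x0, pp = -1: then x0 = -1 ∈ buttons, so minCnt ≤ 1 < k
                    have hppb : pp ∈ buttons := htb pp (by rw [htsing]; simp)
                    have hux2 : PySem.Int.bxor s b = pp := (bxor_eq_zero_iff _ _).mp hclash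
                    have hx0pp : x0 = pp := by rw [← hux, hux2]
                    rcases minCnt_le buttons x0 (List.singleton_sublist.mpr hppb)
                      (by rw [pxor_singleton, hx0pp]) with ⟨k', hk', hkle⟩
                    rw [hmin] at hk'
                    have hkk : k' = k := by injection hk'.symm
                    rw [hkk] at hkle
                    have hk1 : (k : Int) ≤ 1 := by exact_mod_cast hkle
                    omega
                  · rcases sol_min_bound x0 buttons _ hsol with ⟨k', hk', hkle⟩
                    rw [hmin] at hk'
                    have hkk : k' = k := by injection hk'.symm
                    subst hkk
                    omega
              have hc1 : c = n + 1 := by omega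
              rcases hinq with hle | ⟨e, he, he1, he2⟩
              · exact absurd hle hcn
              · -- the visited state still sits in the queue: redirect the continuation there
                obtain ⟨-, hepath, -, -⟩ := hinv.1 e he
                have hee : e.2.2 = n + 1 := he2.trans hc1
                refine ih _ _ hbs' hinv (Or.inr ⟨e, he, ?_⟩) q' v' h
                by_cases hex : ∃ a ∈ r.tail, a ≠ e.2.1
                · obtain ⟨a, ha, hap⟩ := hex
                  have hperm : (a :: r.tail.erase a).Perm r.tail :=
                    (List.perm_cons_erase ha).symm
                  refine ⟨a :: r.tail.erase a, by simp, hperm.nodup_iff.mpr htnd,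
                    fun x hx => htb x (hperm.mem_iff.mp hx), by simpa using hap, ?_, ?_⟩
                  · rw [pxor_perm hperm, he1, ← hhb]
                    exact htx
                  · rw [hee, hperm.length_eq]
                    omega
                · push_neg at hex
                  exfalso
                  have htsing : r.tail = [e.2.1] := by
                    cases htl : r.tail with
                    | nil => exact absurd htl htne
                    | cons a2 t2 =>
                      have ha2 : a2 = e.2.1 := hex a2 (by rw [htl]; simp)
                      cases t2 with
                      | nil => rw [ha2]
                      | cons a3 t3 =>
                        have ha3 : a3 = e.2.1 := hex a3 (by rw [htl]; simp)
                        have : a2 ≠ a3 := by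
                          have := htnd
                          rw [htl] at this
                          exact (List.pairwise_cons.mp this).1 a3 (by simp)
                        exact absurd (ha2.trans ha3.symm) this
                  have hclash : PySem.Int.bxor e.1 e.2.1 = 0 := by
                    have := htx
                    rw [hhb, htsing, pxor_singleton, ← he1] at this
                    exact this
                  have hepath' : PathTo x0 buttons e.1 e.2.1 (n + 1) := hee ▸ hepath
                  rcases clash_drop x0 buttons hx0 e.1 e.2.1 (n + 1) hepath' hclash with
                    ⟨-, -, hc0⟩ | ⟨hsol, -⟩
                  · omega
                  · rcases sol_min_bound x0 buttons _ hsol with ⟨k', hk', hkle⟩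
                    rw [hmin] at hk'
                    have hkk : k' = k := by injection hk'.symm
                    subst hkk
                    omega
            · refine ih _ _ hbs' hinv (Or.inl ?_) q' v' h
              rcases List.mem_cons.mp hmem with hc | hc
              · exact absurd hc hhb
              · exact hc
          · exact ih _ _ hbs' hinv (Or.inr ⟨e, he, hdese⟩) q' v' h

-- ## span bound (fuel sufficiency)

def spanLen (x0 : Int) (buttons : List Int) : Nat :=
  ((buttons.sublists.map (fun S => PySem.Int.bxor x0 (pxor S))).dedup).length

lemma size_le_span (x0 : Int) (buttons : List Int) (t : Int)
    (q : List (Int × Int × Int)) (v : PySem.Dict Int Int)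
    (h : BfsInv x0 buttons t q v) : v.size ≤ spanLen x0 buttons := by
  obtain ⟨-, -, -, hnd, hkeys⟩ := h
  have hsubset : v.keys ⊆ (buttons.sublists.map (fun S => PySem.Int.bxor x0 (pxor S))).dedup := by
    intro k hk
    rcases hkeys k hk with ⟨S, hS, rfl⟩
    exact List.mem_dedup.mpr (List.mem_map.mpr ⟨S, List.mem_sublists.mpr hS, rfl⟩)
  have hlen : v.keys.length ≤ spanLen x0 buttons :=
    (hnd.subperm hsubset).length_le
  have : v.keys.length = v.size := by
    show (v.items.map Prod.fst).length = v.items.length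
    exact List.length_map ..
  omega

lemma spanLen_le (x0 : Int) (buttons : List Int) :
    spanLen x0 buttons ≤ 2 ^ buttons.length := by
  unfold spanLen
  calc ((buttons.sublists.map (fun S => PySem.Int.bxor x0 (pxor S))).dedup).length
      ≤ (buttons.sublists.map (fun S => PySem.Int.bxor x0 (pxor S))).length :=
        (List.dedup_sublist _).length_le
    _ = buttons.sublists.length := List.length_map ..
    _ = 2 ^ buttons.length := List.length_sublists _

-- ## the while-loop

lemma loop_none (x0 : Int) (buttons : List Int) (hx0 : x0 ≠ 0)
    (hmin : minCnt buttons x0 = none) :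
    ∀ (fuel : Nat) (t : Int) (q : List (Int × Int × Int)) (v : PySem.Dict Int Int),
      BfsInv x0 buttons t q v → q.length + spanLen x0 buttons ≤ fuel + v.size →
      dfsLoop buttons fuel q v = -1 := by
  intro fuel
  induction fuel with
  | zero => intro t q v _ _; rfl
  | succ fuel ih =>
    intro t q v hinv hfuel
    cases q with
    | nil => rfl
    | cons e tq =>
      obtain ⟨s, p, n⟩ := e
      have hinv' := bfsinv_relevel x0 buttons t s p n tq v hinv
      obtain ⟨hs, hp, -⟩ := hinv.1 (s, p, n) (by simp)
      have hout := inner_master x0 buttons hx0 s p n hs hp buttons tq v (fun _ h => h) hinv'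
      show (match dfsInner s p n buttons tq v with
        | Sum.inl r => r
        | Sum.inr (q', v') => dfsLoop buttons fuel q' v') = -1
      cases hres : dfsInner s p n buttons tq v with
      | inl r =>
        exfalso
        obtain ⟨-, hsol⟩ := (hres ▸ hout).1 r rfl
        rcases sol_min_bound x0 buttons (n + 1) hsol with ⟨k, hk, -⟩
        rw [hmin] at hk
        simp at hk
      | inr qv =>
        obtain ⟨q', v'⟩ := qv
        obtain ⟨hinv'', hacc, -⟩ := (hres ▸ hout).2 q' v' rfl
        exact ih n q' v' hinv'' (by simp at hfuel; omega)

lemma loop_some (x0 : Int) (buttons : List Int) (hx0 : x0 ≠ 0) (k : Nat)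
    (hmin : minCnt buttons x0 = some k) :
    ∀ (fuel : Nat) (t : Int) (q : List (Int × Int × Int)) (v : PySem.Dict Int Int),
      BfsInv x0 buttons t q v → (∃ e ∈ q, Desig buttons k e) →
      q.length + spanLen x0 buttons ≤ fuel + v.size →
      dfsLoop buttons fuel q v = (k : Int) := by
  intro fuel
  induction fuel with
  | zero =>
    intro t q v hinv hdes hfuel
    exfalso
    have hsz := size_le_span x0 buttons t q v hinv
    have hq : q.length = 0 := by omega
    rcases hdes with ⟨e, he, -⟩
    rw [List.length_eq_zero_iff.mp hq] at he
    exact absurd he (List.not_mem_nil)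
  | succ fuel ih =>
    intro t q v hinv hdes hfuel
    cases q with
    | nil =>
      exfalso
      rcases hdes with ⟨e, he, -⟩
      exact absurd he (List.not_mem_nil)
    | cons e0 tq =>
      obtain ⟨s, p, n⟩ := e0
      have hinv' := bfsinv_relevel x0 buttons t s p n tq v hinv
      obtain ⟨hs, hp, -⟩ := hinv.1 (s, p, n) (by simp)
      have h0n : 0 ≤ n := pathTo_nonneg x0 buttons s p n hp
      have hout := inner_master x0 buttons hx0 s p n hs hp buttons tq v (fun _ h => h) hinv'
      show (match dfsInner s p n buttons tq v with
        | Sum.inl r => r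
        | Sum.inr (q', v') => dfsLoop buttons fuel q' v') = (k : Int)
      rcases hdes with ⟨e, he, hdese⟩
      rcases List.mem_cons.mp he with rfl | hetq
      · -- the designated entry is the popped one
        obtain ⟨r, hrne, hrnd, hrbtn, hrhead, hrx, hrk⟩ := hdese
        by_cases hr1 : r.length = 1
        · -- one press left: the inner loop returns n + 1 = k
          obtain ⟨b1, rfl⟩ := List.length_eq_one_iff.mp hr1
          have hfind := inner_finds s p n buttons tq v
            ⟨b1, hrbtn b1 (by simp), by simpa using hrhead, by
              have := hrx; rwa [pxor_singleton] at this⟩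
          rw [hfind]
          have : (s, p, n).2.2 + ((1:Nat) : Int) = (k : Int) := by simpa using hrk
          simp at this ⊢
          omega
        · have hr2 : 2 ≤ r.length := by
            have := List.length_pos_iff.mpr hrne
            omega
          cases hres : dfsInner s p n buttons tq v with
          | inl r' =>
            exfalso
            obtain ⟨-, hsol⟩ := (hres ▸ hout).1 r' rfl
            rcases sol_min_bound x0 buttons (n + 1) hsol with ⟨k', hk', hkle⟩
            rw [hmin] at hk'
            have : k' = k := by injection hk'.symm
            subst this
            have : (s, p, n).2.2 + (r.length : Int) = (k' : Int) := hrk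
            simp at this
            omega
          | inr qv =>
            obtain ⟨q', v'⟩ := qv
            obtain ⟨hinv'', hacc, -⟩ := (hres ▸ hout).2 q' v' rfl
            have hdes' := inner_desig x0 buttons hx0 k hmin s p n hs hp r hrne hrnd hrbtn
              hrhead hrx (by simpa using hrk) hr2 buttons tq v (fun _ h => h) hinv'
              (Or.inl (hrbtn _ (List.head_mem hrne))) q' v' hres
            exact ih n q' v' hinv'' hdes' (by simp at hfuel; omega)
      · -- the designated entry is further down the queue
        cases hres : dfsInner s p n buttons tq v with
        | inl r' =>
          obtain ⟨hr', hsol⟩ := (hres ▸ hout).1 r' rfl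
          rcases sol_min_bound x0 buttons (n + 1) hsol with ⟨k', hk', hkle⟩
          rw [hmin] at hk'
          have hkk : k' = k := by injection hk'.symm
          subst hkk
          obtain ⟨r, hrne, -, -, -, -, hrk⟩ := hdese
          have hne : n ≤ e.2.2 := (hinv'.1 e hetq).2.2.1
          have hrpos : 1 ≤ r.length := List.length_pos_iff.mpr hrne
          have hge : (r.length : Int) ≥ 1 := by exact_mod_cast hrpos
          dsimp only
          omega
        | inr qv =>
          obtain ⟨q', v'⟩ := qv
          obtain ⟨hinv'', hacc, app, happ⟩ := (hres ▸ hout).2 q' v' rfl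
          refine ih n q' v' hinv'' ⟨e, ?_, hdese⟩ (by simp at hfuel; omega)
          rw [happ]
          exact List.mem_append.mpr (Or.inl hetq)

lemma loop_ret_one (x0 : Int) (buttons : List Int) (hx0 : x0 ≠ 0) :
    ∀ (fuel : Nat) (t : Int) (q : List (Int × Int × Int)) (v : PySem.Dict Int Int),
      BfsInv x0 buttons t q v → dfsLoop buttons fuel q v = 1 → SolLen x0 buttons 1 := by
  intro fuel
  induction fuel with
  | zero =>
    intro t q v _ h
    have hv : dfsLoop buttons 0 q v = -1 := rfl
    rw [hv] at h
    exact absurd h (by decide)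
  | succ fuel ih =>
    intro t q v hinv h
    cases q with
    | nil =>
      have hv : dfsLoop buttons (fuel + 1) [] v = -1 := rfl
      rw [hv] at h
      exact absurd h (by decide)
    | cons e tq =>
      obtain ⟨s, p, n⟩ := e
      have hinv' := bfsinv_relevel x0 buttons t s p n tq v hinv
      obtain ⟨hs, hp, -⟩ := hinv.1 (s, p, n) (by simp)
      have hout := inner_master x0 buttons hx0 s p n hs hp buttons tq v (fun _ h => h) hinv'
      rw [show dfsLoop buttons (fuel + 1) ((s, p, n) :: tq) v
          = (match dfsInner s p n buttons tq v with
            | Sum.inl r => r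
            | Sum.inr (q', v') => dfsLoop buttons fuel q' v') from rfl] at h
      cases hres : dfsInner s p n buttons tq v with
      | inl r =>
        rw [hres] at h
        dsimp only at h
        obtain ⟨hr, hsol⟩ := (hres ▸ hout).1 r rfl
        rw [h] at hr
        rw [← hr] at hsol
        exact hsol
      | inr qv =>
        obtain ⟨q', v'⟩ := qv
        rw [hres] at h
        dsimp only at h
        obtain ⟨hinv'', -, -⟩ := (hres ▸ hout).2 q' v' rfl
        exact ih n q' v' hinv'' h

lemma bfsinv_init (x0 : Int) (buttons : List Int) (hx0 : x0 ≠ 0) :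
    BfsInv x0 buttons 0 [(x0, -1, 0)] (PySem.Dict.empty.insert x0 0) := by
  have hget : ∀ k : Int, (PySem.Dict.empty.insert x0 (0:Int)).get? k =
      if k = x0 then some 0 else none := by
    intro k; rw [PySem.Dict.get?_insert]; simp
  have hroot : PathTo x0 buttons x0 (-1) 0 :=
    ⟨[], ⟨by constructor, by simp⟩, by simp [pxor_nil, PySem.Int.bxor_zero], by simp, by simp⟩
  refine ⟨?_, by simp, ?_, ?_, ?_⟩
  · intro e he
    simp only [List.mem_singleton] at he
    subst he
    exact ⟨hx0, hroot, by simp, by norm_num⟩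
  · intro k c hk
    rw [hget] at hk
    by_cases hkx : k = x0
    · simp [hkx] at hk
      subst hkx
      exact ⟨⟨-1, by rw [← hk]; exact hroot⟩, by omega, Or.inl (by omega)⟩
    · simp [hkx] at hk
  · show ([] ++ [(x0, (0:Int))] : List (Int × Int)).map Prod.fst |>.Nodup
    simp
  · intro k hk
    have : k = x0 := by
      have : (PySem.Dict.empty.insert x0 (0:Int)).keys = [x0] := rfl
      rw [this] at hk; simpa using hk
    exact ⟨[], List.nil_sublist _, by simp [this, pxor_nil, PySem.Int.bxor_zero]⟩

-- a minimal subset yields an initial designated continuation (outside D_dfs)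
lemma minCnt_to_walk (x0 : Int) (buttons : List Int) (hx0 : x0 ≠ 0) (k : Nat)
    (hmin : minCnt buttons x0 = some k) (hD : ¬ (x0 = -1 ∧ (-1 : Int) ∈ buttons)) :
    ∃ r, ∃ hr : r ≠ [], r.Nodup ∧ (∀ a ∈ r, a ∈ buttons) ∧ r.head hr ≠ -1 ∧
      pxor r = x0 ∧ r.length = k := by
  rcases (minCnt_eq_some_iff buttons x0 k).mp hmin with ⟨⟨S, hS, hSx, hSlen⟩, hminimal⟩
  -- minimal S is duplicate-free
  have hSnd : S.Nodup := by
    by_contra hnd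
    rcases List.exists_duplicate_iff_not_nodup.mpr hnd with ⟨x, hdup⟩
    have hx : x ∈ S := hdup.mem
    have hcnt : 2 ≤ List.count x S := List.duplicate_iff_two_le_count.mp hdup
    have hx2 : x ∈ S.erase x := by
      rw [← List.count_pos_iff, List.count_erase_self]; omega
    have hperm : S.Perm (x :: x :: (S.erase x).erase x) :=
      (List.perm_cons_erase hx).trans ((List.perm_cons_erase hx2).cons x)
    set t := (S.erase x).erase x with ht
    have htx : pxor t = x0 := by
      have := pxor_perm hperm
      rw [pxor_cons, pxor_cons, ← bxor_assoc, PySem.Int.bxor_self, zero_bxor] at this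
      rw [← this, hSx]
    have htlen : S.length = t.length + 2 := by simpa using hperm.length_eq
    have htb : ∀ a ∈ t, a ∈ buttons :=
      fun a ha => hS.mem (List.erase_subset (List.erase_subset ha))
    rcases seqToSub buttons t htb with ⟨S', hS', hx', hle'⟩
    have := hminimal S' hS' (hx'.trans htx)
    omega
  have hSne : S ≠ [] := by
    intro hc; rw [hc, pxor_nil] at hSx; exact hx0 hSx.symm
  by_cases hmem : (-1 : Int) ∈ S
  · -- put some other element first (S = [-1] is the excluded D case)
    have hSb : ∀ a ∈ S, a ∈ buttons := fun a ha => hS.mem ha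
    have hperm1 : S.Perm ((-1 : Int) :: S.erase (-1)) := List.perm_cons_erase hmem
    have herase : S.erase (-1) ≠ [] := by
      intro hc
      rw [hc] at hperm1
      have hSsing : S = [(-1 : Int)] := List.perm_singleton.mp hperm1
      have : pxor S = -1 := by rw [hSsing, pxor_singleton]
      exact hD ⟨by rw [← hSx, this], hSb _ hmem⟩
    have hperm : (S.erase (-1) ++ [(-1 : Int)]).Perm S :=
      (List.perm_append_singleton _ _).trans hperm1.symm
    have hrne : S.erase (-1) ++ [(-1 : Int)] ≠ [] := by simp
    refine ⟨S.erase (-1) ++ [(-1 : Int)], hrne, hperm.nodup_iff.mpr hSnd, ?_, ?_, ?_, ?_⟩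
    · intro a ha
      exact hSb a (hperm.mem_iff.mp ha)
    · rw [List.head_append_left herase]
      intro hc
      exact hSnd.not_mem_erase (hc ▸ List.head_mem herase)
    · rw [pxor_perm hperm, hSx]
    · rw [← hSlen]; exact hperm.length_eq
  · refine ⟨S, hSne, hSnd, fun a ha => hS.mem ha, ?_, hSx, hSlen⟩
    intro hc
    exact hmem (hc ▸ List.head_mem hSne)

-- ## B characterization

def omin : Option Nat → Option Nat → Option Nat
  | none, b => b
  | some a, none => some a
  | some a, some b => some (min a b)

lemma min?_omin (l₁ l₂ : List Nat) : (l₁ ++ l₂).min? = omin l₁.min? l₂.min? := by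
  cases h₁ : l₁.min? with
  | none =>
    rw [List.min?_eq_none_iff.mp h₁]
    simp [omin]
  | some a =>
    cases h₂ : l₂.min? with
    | none =>
      rw [List.min?_eq_none_iff.mp h₂]
      simp [omin, h₁]
    | some c =>
      obtain ⟨ha, hale⟩ := List.min?_eq_some_iff.mp h₁
      obtain ⟨hc, hcle⟩ := List.min?_eq_some_iff.mp h₂
      show (l₁ ++ l₂).min? = some (min a c)
      rw [List.min?_eq_some_iff]
      constructor
      · rcases Nat.le_total a c with h | h
        · rw [Nat.min_eq_left h]; exact List.mem_append.mpr (Or.inl ha)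
        · rw [Nat.min_eq_right h]; exact List.mem_append.mpr (Or.inr hc)
      · intro b hb
        rcases List.mem_append.mp hb with h | h
        · exact le_trans (Nat.min_le_left _ _) (hale b h)
        · exact le_trans (Nat.min_le_right _ _) (hcle b h)

lemma min?_map_succ (l : List Nat) :
    (l.map (fun j => j + 1)).min? = l.min?.map (fun j => j + 1) := by
  cases h : l.min? with
  | none =>
    rw [List.min?_eq_none_iff.mp h]
    rfl
  | some a =>
    obtain ⟨ha, hale⟩ := List.min?_eq_some_iff.mp h
    show _ = some (a + 1)
    rw [List.min?_eq_some_iff]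
    refine ⟨List.mem_map.mpr ⟨a, ha, rfl⟩, ?_⟩
    intro b hb
    rcases List.mem_map.mp hb with ⟨c, hc, rfl⟩
    exact Nat.add_le_add_right (hale c hc) 1

lemma minCnt_concat (bs : List Int) (b : Int) (x : Int) :
    minCnt (bs ++ [b]) x =
      omin (minCnt bs x) ((minCnt bs (PySem.Int.bxor x b)).map (fun j => j + 1)) := by
  unfold minCnt
  rw [List.sublists_concat, List.filter_append, List.map_append, min?_omin]
  congr 1
  rw [List.filter_map]
  have hpred : List.filter ((fun S => decide (pxor S = x)) ∘ (fun S => S ++ [b])) bs.sublists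
      = List.filter (fun S => decide (pxor S = PySem.Int.bxor x b)) bs.sublists := by
    apply List.filter_congr
    intro S _
    simp only [Function.comp]
    rw [decide_eq_decide]
    rw [pxor_append, pxor_singleton]
    constructor
    · intro h
      rw [← h, bxor_cancel_right]
    · intro h
      rw [h, bxor_cancel_right]
  rw [hpred, List.map_map]
  have : (List.length ∘ fun S => S ++ [b]) = (fun j => j + 1) ∘ (List.length (α := Int)) := by
    funext S
    simp
  rw [this, ← List.map_map, min?_map_succ]

lemma minCnt_nil (x : Int) : minCnt [] x = if x = 0 then some 0 else none := by
  by_cases h : x = 0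
  · subst h; decide
  · rw [if_neg h]
    unfold minCnt
    have : List.filter (fun S => decide (pxor S = x)) ([] : List Int).sublists = [] := by
      simp [List.sublists_nil, pxor_nil, Ne.symm h]
    rw [this]
    rfl

def combineOpt (o : Option Int) (c1 : Int) : Option Int :=
  match o with
  | none => some c1
  | some cx => some (if c1 < cx then c1 else cx)

lemma upd_get_self (b : Int) (acc : PySem.Dict Int Int) (a c : Int) :
    (dfsAltUpd b acc (a, c)).get? (PySem.Int.bxor a b) =
      combineOpt (acc.get? (PySem.Int.bxor a b)) (c + 1) := by
  show (match acc.get? (PySem.Int.bxor a b) with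
    | none => acc.insert (PySem.Int.bxor a b) (c + 1)
    | some cy => if c + 1 < cy then acc.insert (PySem.Int.bxor a b) (c + 1)
        else acc).get? (PySem.Int.bxor a b) = _
  cases h : acc.get? (PySem.Int.bxor a b) with
  | none => simp [combineOpt]
  | some cy =>
    unfold combineOpt
    dsimp only
    split_ifs with hlt
    · simp
    · simp [h]

lemma upd_get_other (b : Int) (acc : PySem.Dict Int Int) (a c x : Int)
    (hx : x ≠ PySem.Int.bxor a b) :
    (dfsAltUpd b acc (a, c)).get? x = acc.get? x := by
  show (match acc.get? (PySem.Int.bxor a b) with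
    | none => acc.insert (PySem.Int.bxor a b) (c + 1)
    | some cy => if c + 1 < cy then acc.insert (PySem.Int.bxor a b) (c + 1)
        else acc).get? x = _
  cases h : acc.get? (PySem.Int.bxor a b) with
  | none => simp [PySem.Dict.get?_insert, hx]
  | some cy =>
    dsimp only
    split_ifs with hlt
    · simp [PySem.Dict.get?_insert, hx]
    · rfl

lemma step_fold (b : Int) (d : PySem.Dict Int Int) :
    ∀ (L : List (Int × Int)) (acc : PySem.Dict Int Int),
      (L.map Prod.fst).Nodup →
      (∀ pr ∈ L, d.get? pr.1 = some pr.2) →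
      (∀ z, PySem.Int.bxor z b ∈ L.map Prod.fst → acc.get? z = d.get? z) →
      ∀ x, (L.foldl (dfsAltUpd b) acc).get? x =
        if PySem.Int.bxor x b ∈ L.map Prod.fst
        then match d.get? (PySem.Int.bxor x b) with
             | some c => combineOpt (acc.get? x) (c + 1)
             | none => acc.get? x
        else acc.get? x := by
  intro L
  induction L with
  | nil => intro acc _ _ _ x; simp
  | cons pr L' ih =>
    intro acc hnd hprs hacc x
    obtain ⟨a, c⟩ := pr
    have hdac : d.get? a = some c := hprs (a, c) (by simp)
    have hndc : (a :: L'.map Prod.fst).Nodup := by simpa using hnd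
    have hanotin : a ∉ L'.map Prod.fst := fun h => (List.pairwise_cons.mp hndc).1 a h rfl
    have hnd' : (L'.map Prod.fst).Nodup := (List.pairwise_cons.mp hndc).2
    set y := PySem.Int.bxor a b with hy
    have hyb : PySem.Int.bxor y b = a := by rw [hy, bxor_cancel_right]
    have haccy : acc.get? y = d.get? y := hacc y (by rw [hyb]; simp)
    set acc₁ := dfsAltUpd b acc (a, c) with hacc₁
    have hstep : (L'.foldl (dfsAltUpd b) acc₁).get? x =
        if PySem.Int.bxor x b ∈ L'.map Prod.fst
        then match d.get? (PySem.Int.bxor x b) with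
             | some c' => combineOpt (acc₁.get? x) (c' + 1)
             | none => acc₁.get? x
        else acc₁.get? x := by
      refine ih acc₁ hnd' (fun pr h => hprs pr (by simp [h])) ?_ x
      intro z hz
      have hzy : z ≠ y := by
        intro hc
        rw [hc, hyb] at hz
        exact hanotin hz
      rw [hacc₁, upd_get_other b acc a c z hzy]
      exact hacc z (by simp [hz])
    show (L'.foldl (dfsAltUpd b) acc₁).get? x = _
    by_cases hxy : x = y
    · have hnotin : PySem.Int.bxor x b ∉ L'.map Prod.fst := by
        rw [hxy, hyb]; exact hanotin
      rw [hstep, if_neg hnotin]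
      have hmem : PySem.Int.bxor x b ∈ ((a, c) :: L').map Prod.fst := by
        rw [hxy, hyb]; simp
      rw [if_pos hmem, hxy, hyb, hdac]
      dsimp only
      exact upd_get_self b acc a c
    · have hx1 : acc₁.get? x = acc.get? x := upd_get_other b acc a c x hxy
      by_cases hmem : PySem.Int.bxor x b ∈ L'.map Prod.fst
      · rw [hstep, if_pos hmem,
          if_pos (show PySem.Int.bxor x b ∈ ((a, c) :: L').map Prod.fst by simp [hmem])]
        cases d.get? (PySem.Int.bxor x b) <;> simp [hx1]
      · have hmem2 : PySem.Int.bxor x b ∉ ((a, c) :: L').map Prod.fst := by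
          simp only [List.map_cons, List.mem_cons]
          rintro (h | h)
          · refine hxy ?_
            have := congrArg (fun z => PySem.Int.bxor z b) (h.trans hyb.symm)
            simpa [bxor_cancel_right] using this
          · exact hmem h
        rw [hstep, if_neg hmem, if_neg hmem2, hx1]

lemma step_get (d : PySem.Dict Int Int) (hnd : d.keys.Nodup) (b x : Int) :
    (dfsAltStep d b).get? x =
      match d.get? (PySem.Int.bxor x b) with
      | some c => combineOpt (d.get? x) (c + 1)
      | none => d.get? x := by
  have h := step_fold b d d.items d hnd
    (fun pr hpr => by
      obtain ⟨k0, v0⟩ := pr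
      exact PySem.Dict.get?_of_mem_items d hpr hnd)
    (fun z _ => rfl) x
  unfold dfsAltStep
  rw [h]
  by_cases hmem : PySem.Int.bxor x b ∈ d.items.map Prod.fst
  · rw [if_pos hmem]
  · rw [if_neg hmem]
    have : d.get? (PySem.Int.bxor x b) = none := by
      rw [PySem.Dict.get?_eq_none_iff_not_mem_keys]
      exact hmem
    rw [this]

lemma step_nodup (d : PySem.Dict Int Int) (b : Int) (hnd : d.keys.Nodup) :
    (dfsAltStep d b).keys.Nodup := by
  unfold dfsAltStep
  generalize d.items = L
  induction L generalizing d with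
  | nil => exact hnd
  | cons pr L' ih =>
    show (L'.foldl (dfsAltUpd b) (dfsAltUpd b d pr)).keys.Nodup
    refine ih (dfsAltUpd b d pr) ?_
    show (match d.get? (PySem.Int.bxor pr.1 b) with
      | none => d.insert (PySem.Int.bxor pr.1 b) (pr.2 + 1)
      | some cy => if pr.2 + 1 < cy then d.insert (PySem.Int.bxor pr.1 b) (pr.2 + 1)
          else d).keys.Nodup
    cases d.get? (PySem.Int.bxor pr.1 b) with
    | none => exact PySem.Dict.nodup_keys_insert _ _ _ hnd
    | some cy =>
      dsimp only
      split_ifs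
      · exact PySem.Dict.nodup_keys_insert _ _ _ hnd
      · exact hnd

lemma alt_fold_get (buttons : List Int) :
    (buttons.foldl dfsAltStep (PySem.Dict.empty.insert 0 0)).keys.Nodup ∧
    ∀ x, (buttons.foldl dfsAltStep (PySem.Dict.empty.insert 0 0)).get? x =
      (minCnt buttons x).map (fun j => (j : Int)) := by
  induction buttons using List.reverseRecOn with
  | nil =>
    rw [List.foldl_nil]
    constructor
    · show ([] ++ [((0:Int), (0:Int))] : List (Int × Int)).map Prod.fst |>.Nodup
      simp
    · intro x
      rw [show (PySem.Dict.empty.insert (0:Int) (0:Int)).get? x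
          = if x = 0 then some 0 else none by rw [PySem.Dict.get?_insert]; simp,
        minCnt_nil]
      by_cases h : x = 0 <;> simp [h]
  | append_singleton bs b ih =>
    obtain ⟨ihnd, ihget⟩ := ih
    rw [List.foldl_append, List.foldl_cons, List.foldl_nil]
    refine ⟨step_nodup _ b ihnd, ?_⟩
    intro x
    rw [step_get _ ihnd b x, minCnt_concat, ihget, ihget]
    cases h1 : minCnt bs (PySem.Int.bxor x b) with
    | none =>
      cases h2 : minCnt bs x with
      | none => simp [omin]
      | some cx => simp [omin]
    | some c =>
      cases h2 : minCnt bs x with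
      | none =>
        show combineOpt none ((c : Int) + 1) = _
        simp [omin, combineOpt]
      | some cx =>
        show combineOpt (some (cx : Int)) ((c : Int) + 1) = _
        simp only [omin, combineOpt, Option.map_some]
        congr 1
        split_ifs with h
        · have h2 : min cx (c + 1) = c + 1 := by push_cast at h; omega
          rw [h2]; push_cast; ring
        · have h2 : min cx (c + 1) = cx := by push_cast at h; omega
          rw [h2]

lemma dfs_alt_eq (state : Int) (buttons : List Int) :
    dfs_alt state buttons =
      (match minCnt buttons state with
       | some k => (k : Int)
       | none => -1) := by
  rcases alt_fold_get buttons with ⟨-, hget⟩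
  unfold dfs_alt
  rw [PySem.Dict.getD_eq_get?_getD, hget state]
  cases minCnt buttons state <;> rfl

-- ## assembling

lemma dfs_eq_alt (state : Int) (buttons : List Int)
    (hD : ¬ D_dfs state buttons) : dfs state buttons = dfs_alt state buttons := by
  rw [dfs_alt_eq]
  unfold dfs
  by_cases h0 : state = 0
  · rw [if_pos h0]
    have hm : minCnt buttons state = some 0 := by
      rw [h0]
      exact (minCnt_eq_some_iff buttons 0 0).mpr
        ⟨⟨[], List.nil_sublist _, pxor_nil, rfl⟩, fun S _ _ => Nat.zero_le _⟩
    rw [hm]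
    rfl
  · rw [if_neg h0]
    have hinv := bfsinv_init state buttons h0
    have hspan := spanLen_le state buttons
    have hsz : (PySem.Dict.empty.insert state (0:Int)).size = 1 := rfl
    have hfuel : ([(state, (-1:Int), (0:Int))].length) + spanLen state buttons
        ≤ (2 ^ buttons.length + 1) + (PySem.Dict.empty.insert state (0:Int)).size := by
      simp [hsz]
      omega
    cases hmin : minCnt buttons state with
    | none =>
      rw [loop_none state buttons h0 hmin (2 ^ buttons.length + 1) 0 _ _ hinv hfuel]
    | some k =>
      have hD' : ¬ (state = -1 ∧ (-1 : Int) ∈ buttons) := hD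
      obtain ⟨r, hrne, hrnd, hrb, hrhead, hrx, hrlen⟩ :=
        minCnt_to_walk state buttons h0 k hmin hD'
      have hdes : Desig buttons k ((state : Int), (-1 : Int), (0 : Int)) := by
        refine ⟨r, hrne, hrnd, hrb, hrhead, ?_, ?_⟩
        · rw [hrx]; exact PySem.Int.bxor_self state
        · simp [hrlen]
      rw [loop_some state buttons h0 k hmin (2 ^ buttons.length + 1) 0 _ _ hinv
        ⟨_, by simp, hdes⟩ hfuel]

lemma dfs_alt_diff (state : Int) (buttons : List Int) (hD : D_dfs state buttons) :
    dfs_alt state buttons = 1 := by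
  obtain ⟨h1, h2⟩ := hD
  rw [dfs_alt_eq]
  have hm : minCnt buttons state = some 1 := by
    rw [h1]
    refine (minCnt_eq_some_iff _ _ _).mpr
      ⟨⟨[-1], List.singleton_sublist.mpr h2, pxor_singleton _, rfl⟩, ?_⟩
    intro S hS hx
    cases S with
    | nil => rw [pxor_nil] at hx; exact absurd hx (by decide)
    | cons a S' => simp
  rw [hm]
  rfl

lemma dfs_ne_one (state : Int) (buttons : List Int) (hD : D_dfs state buttons) :
    dfs state buttons ≠ 1 := by
  obtain ⟨h1, h2⟩ := hD
  have h0 : state ≠ 0 := by rw [h1]; decide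
  unfold dfs
  rw [if_neg h0]
  intro hcon
  have hsol := loop_ret_one state buttons h0 (2 ^ buttons.length + 1) 0 _ _
    (bfsinv_init state buttons h0) hcon
  rcases hsol with ⟨l, ⟨hch, -⟩, hlne, hx, hlen⟩
  have hl1 : l.length = 1 := by exact_mod_cast hlen
  obtain ⟨b, rfl⟩ := List.length_eq_one_iff.mp hl1
  have hb : (-1 : Int) ≠ b := (List.isChain_cons_cons.mp hch).1
  rw [pxor_singleton] at hx
  exact hb (by rw [hx, h1])

-- ===== VERDICT =====
theorem dfs_spec : Claim_unchanged_dfs := by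
  intro state buttons _ hD
  exact (dfs_eq_alt state buttons hD).symm ▸ rfl

theorem dfs_changed : Claim_changed_dfs := by
  unfold Claim_changed_dfs; decide

theorem dfs_tight : Claim_exact_dfs := by
  intro state buttons _ hD h
  exact dfs_ne_one state buttons hD (h.trans (dfs_alt_diff state buttons hD))
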